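-- pv_equiv track=rewrite | github.com/CUNY-AI-Lab/pdf-accessibility-app | backend/app/pipeline/structure.py | _toc_table_text
-- ===== SOURCE A (Python) =====
-- def _toc_table_text(element: dict) -> str:
--     """Collapse a TOC table's visible rows into one fallback text string."""
--     cells = element.get("cells") or []
--     if not isinstance(cells, list) or not cells:
--         return ""
--
--     rows: dict[int, list[str]] = {}
--     for cell in cells:
--         try:
--             row = int(cell.get("row", 0))
--         except Exception:
--             row = 0
--         text = " ".join(str(cell.get("text", "")).split()).strip()
--         if text:
--             rows.setdefault(row, []).append(text)
--
--     parts: list[str] = []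
--     for row_index in sorted(rows):
--         parts.append(" ".join(rows[row_index]))
--     return " ".join(parts).strip()
-- ===== SOURCE B (Python) =====
-- def _toc_table_text(element: dict) -> str:
--     """Collapse a TOC table's visible rows into one fallback text string.
--
--     Flat re-implementation: collect (row, text) pairs once, then emit every
--     text in row-sorted order in a single join -- no per-row lists or dict.
--     """
--     cells = element.get("cells") or []
--     if not isinstance(cells, list) or not cells:
--         return ""
--
--     pairs = []
--     for cell in cells:
--         try:
--             row = int(cell.get("row", 0))
--         except Exception:
--             row = 0
--         text = " ".join(str(cell.get("text", "")).split()).strip()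
--         if text:
--             pairs.append((row, text))
--
--     keys = sorted({r for r, _ in pairs})
--     return " ".join(t for k in keys for r, t in pairs if r == k).strip()
-- ===== Notes on version B (the rewrite author's own statement) =====
-- stated objective: alternative
-- what changed: Replaces the dict-of-row-lists grouping with per-row joins by a flat pipeline: collect (row, text) pairs once, then emit all texts in one single join iterating the sorted set of row keys with a filter per key (no dict, no intermediate per-row strings).
import Mathlib
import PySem

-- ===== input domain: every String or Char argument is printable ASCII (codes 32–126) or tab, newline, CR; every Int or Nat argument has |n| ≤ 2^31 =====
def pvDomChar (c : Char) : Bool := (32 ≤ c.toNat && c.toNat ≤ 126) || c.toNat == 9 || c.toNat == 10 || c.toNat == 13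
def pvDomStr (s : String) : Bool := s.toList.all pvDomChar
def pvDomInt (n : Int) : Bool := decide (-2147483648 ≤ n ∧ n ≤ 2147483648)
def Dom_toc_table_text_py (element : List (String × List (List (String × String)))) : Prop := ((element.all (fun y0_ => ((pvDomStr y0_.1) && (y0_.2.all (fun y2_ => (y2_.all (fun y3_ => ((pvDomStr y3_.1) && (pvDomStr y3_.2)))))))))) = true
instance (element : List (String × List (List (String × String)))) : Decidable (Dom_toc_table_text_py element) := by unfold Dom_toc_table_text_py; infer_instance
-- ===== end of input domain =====

-- B replaces A's dict-of-row-lists grouping (with per-row joins) by a flat pipeline: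
-- collect (row, text) pairs once, then one single join over the sorted set of row
-- keys with a filter per key ('alternative' objective; not claimed faster).

-- ===== PORT A =====
-- shared cell normalization (identical code lines in both Pythons):
-- row = int(cell.get("row", 0)) with except -> 0
def tocRow (cell : List (String × String)) : Int :=
  match (PySem.Dict.mk cell).get? "row" with
  | none => 0
  | some s => (PySem.Int.ofStr? s).getD 0

-- text = " ".join(str(cell.get("text", "")).split()).strip()
def tocText (cell : List (String × String)) : String :=
  PySem.Str.strip (PySem.Str.join " " (PySem.Str.split₀ ((PySem.Dict.mk cell).getD "text" "")))

def toc_table_text_py (element : List (String × List (List (String × String)))) : String :=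
  let cells := (PySem.Dict.mk element).getD "cells" []
  if cells = [] then ""
  else
    let rows : PySem.Dict Int (List String) :=
      cells.foldl (fun d cell =>
        let row := tocRow cell
        let text := tocText cell
        if text ≠ "" then d.modify row [] (· ++ [text]) else d) PySem.Dict.empty
    let parts : List String :=
      (PySem.List.sorted rows.keys (fun k => k)).foldl
        (fun parts k => parts ++ [PySem.Str.join " " (rows.getD k [])]) []
    PySem.Str.strip (PySem.Str.join " " parts)

-- ===== PORT B =====
def toc_table_text_py_alt (element : List (String × List (List (String × String)))) : String :=
  let cells := (PySem.Dict.mk element).getD "cells" []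
  if cells = [] then ""
  else
    let pairs : List (Int × String) :=
      cells.foldl (fun acc cell =>
        let row := tocRow cell
        let text := tocText cell
        if text ≠ "" then acc ++ [(row, text)] else acc) []
    let keys := PySem.List.sorted (PySem.Set.ofList (pairs.map Prod.fst)) (fun k => k)
    PySem.Str.strip (PySem.Str.join " "
      (keys.flatMap (fun k => (pairs.filter (fun p => p.1 == k)).map Prod.snd)))

-- ===== PRECONDITION & SPEC =====
def Spec_toc_table_text_py (element : List (String × List (List (String × String)))) (out : String) : Prop := out = toc_table_text_py_alt element
instance (element : List (String × List (List (String × String)))) (out : String) : Decidable (Spec_toc_table_text_py element out) := by unfold Spec_toc_table_text_py; infer_instance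

-- ===== CLAIM (what is proved, stated in full; the proofs are below) =====
def Claim_equal_toc_table_text_py : Prop := ∀ (element : List (String × List (List (String × String)))), Dom_toc_table_text_py element → Spec_toc_table_text_py element (toc_table_text_py element)

-- ===== LEMMAS AND PROOFS =====

-- the filtered (row, text) pair list of a cell list, structurally
def pairsList (cells : List (List (String × String))) : List (Int × String) :=
  match cells with
  | [] => []
  | c :: cs => (if tocText c ≠ "" then [(tocRow c, tocText c)] else []) ++ pairsList cs

-- B's accumulator loop builds pairsList
lemma bFold_eq_pairsList (cells : List (List (String × String))) (acc : List (Int × String)) :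
    cells.foldl (fun acc cell =>
        let row := tocRow cell
        let text := tocText cell
        if text ≠ "" then acc ++ [(row, text)] else acc) acc = acc ++ pairsList cells := by
  induction cells generalizing acc with
  | nil => simp [pairsList]
  | cons c cs ih =>
    rw [List.foldl_cons]
    show cs.foldl _ (if tocText c ≠ "" then acc ++ [(tocRow c, tocText c)] else acc)
        = acc ++ pairsList (c :: cs)
    by_cases h : tocText c ≠ ""
    · rw [if_pos h, ih, pairsList]; simp [h]
    · rw [if_neg h, ih, pairsList]; simp [h]

-- A's dict loop equals folding the pair list into the dict
lemma aFold_eq_pairsFold (cells : List (List (String × String))) (d : PySem.Dict Int (List String)) :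
    cells.foldl (fun d cell =>
        let row := tocRow cell
        let text := tocText cell
        if text ≠ "" then d.modify row [] (· ++ [text]) else d) d
      = (pairsList cells).foldl (fun d p => d.modify p.1 [] (· ++ [p.2])) d := by
  induction cells generalizing d with
  | nil => simp [pairsList]
  | cons c cs ih =>
    rw [List.foldl_cons]
    show cs.foldl _ (if tocText c ≠ "" then d.modify (tocRow c) [] (· ++ [tocText c]) else d)
        = (pairsList (c :: cs)).foldl _ d
    by_cases h : tocText c ≠ ""
    · rw [if_pos h, ih, pairsList, if_pos h]; rfl
    · rw [if_neg h, ih, pairsList, if_neg h]; rfl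

-- the dict's group for key k, read back with getD
lemma getD_pairsFold (ps : List (Int × String)) (d : PySem.Dict Int (List String)) (k : Int) :
    (ps.foldl (fun d p => d.modify p.1 [] (· ++ [p.2])) d).getD k []
      = d.getD k [] ++ (ps.filter (fun p => p.1 == k)).map Prod.snd := by
  induction ps generalizing d with
  | nil => simp
  | cons p ps ih =>
    simp only [List.foldl_cons, ih, List.filter_cons]
    by_cases h : k = p.1
    · simp [h]
    · have h' : (p.1 == k) = false := by simp; omega
      simp [PySem.Dict.getD_modify, h, h']

lemma keys_insert {ν : Type} (d : PySem.Dict Int ν) (k : Int) (v : ν) :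
    (d.insert k v).keys = PySem.Set.add d.keys k := by
  have hck : d.contains k = true ↔ PySem.Set.contains d.keys k = true := by
    rw [PySem.Set.contains_iff]
    simp only [PySem.Dict.contains, PySem.Dict.keys, List.any_eq_true, List.mem_map, beq_iff_eq]
  unfold PySem.Dict.insert PySem.Set.add
  by_cases h : d.contains k = true
  · rw [if_pos h, if_pos (hck.mp h)]
    show List.map (fun x => x.1) (d.items.map fun p => if (p.1 == k) = true then (k, v) else p)
        = List.map (fun x => x.1) d.items
    rw [List.map_map]
    apply List.map_congr_left
    intro p _
    by_cases hpk : (p.1 == k) = true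
    · simp only [Function.comp, hpk, if_true]; exact (eq_of_beq hpk).symm
    · simp [Function.comp, hpk]
  · rw [if_neg h, if_neg (fun hc => h (hck.mpr hc))]
    show List.map (fun x => x.1) (d.items ++ [(k, v)]) = List.map (fun x => x.1) d.items ++ [k]
    simp

lemma keys_pairsFold (ps : List (Int × String)) (d : PySem.Dict Int (List String)) :
    (ps.foldl (fun d p => d.modify p.1 [] (· ++ [p.2])) d).keys
      = ps.foldl (fun s p => PySem.Set.add s p.1) d.keys := by
  induction ps generalizing d with
  | nil => rfl
  | cons p ps ih =>
    rw [List.foldl_cons, List.foldl_cons, ih]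
    congr 1
    exact keys_insert d p.1 _

lemma keys_pairsFold_empty (ps : List (Int × String)) :
    (ps.foldl (fun d p => d.modify p.1 [] (· ++ [p.2])) PySem.Dict.empty).keys
      = PySem.Set.ofList (ps.map Prod.fst) := by
  rw [keys_pairsFold]
  show _ = (ps.map Prod.fst).foldl PySem.Set.add PySem.Set.empty
  rw [List.foldl_map]
  rfl

-- A's parts-append loop is a map
lemma partsFold_eq_map (ks : List Int) (f : Int → String) (acc : List String) :
    ks.foldl (fun parts k => parts ++ [f k]) acc = acc ++ ks.map f := by
  induction ks generalizing acc with
  | nil => simp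
  | cons k ks ih => simp [ih]

-- sep.join over a split list (Chars level)
lemma chars_join_append (sep : List Char) (a b : List (List Char)) (ha : a ≠ []) (hb : b ≠ []) :
    PySem.Chars.join sep (a ++ b) = PySem.Chars.join sep a ++ sep ++ PySem.Chars.join sep b := by
  induction a with
  | nil => exact absurd rfl ha
  | cons x a' ih =>
    cases a' with
    | nil =>
      obtain ⟨y, b', rfl⟩ : ∃ y b', b = y :: b' := by
        cases b with
        | nil => exact absurd rfl hb
        | cons y b' => exact ⟨y, b', rfl⟩
      simp [PySem.Chars.join_cons_cons, PySem.Chars.join_singleton]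
    | cons x2 a'' =>
      have ih' := ih (by simp)
      calc PySem.Chars.join sep ((x :: x2 :: a'') ++ b)
          = x ++ sep ++ PySem.Chars.join sep ((x2 :: a'') ++ b) := by
            rw [List.cons_append, List.cons_append, PySem.Chars.join_cons_cons]
        _ = x ++ sep ++ (PySem.Chars.join sep (x2 :: a'') ++ sep ++ PySem.Chars.join sep b) := by
            rw [ih']
        _ = PySem.Chars.join sep (x :: x2 :: a'') ++ sep ++ PySem.Chars.join sep b := by
            rw [PySem.Chars.join_cons_cons]; simp [List.append_assoc]

-- join of per-group joins equals one flat join, when every group is nonempty (Chars level)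
lemma chars_join_flatten (sep : List Char) (groups : List (List (List Char)))
    (h : ∀ g ∈ groups, g ≠ []) :
    PySem.Chars.join sep (groups.map (PySem.Chars.join sep)) = PySem.Chars.join sep groups.flatten := by
  induction groups with
  | nil => simp [PySem.Chars.join_nil]
  | cons g rest ih =>
    cases rest with
    | nil => simp [PySem.Chars.join_singleton]
    | cons g2 rest2 =>
      have hg : g ≠ [] := h g (by simp)
      have hrest : ∀ x ∈ g2 :: rest2, x ≠ [] := fun x hx => h x (by simp [hx])
      have hflat : (g2 :: rest2).flatten ≠ [] := by
        intro hnil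
        exact hrest g2 (by simp) (List.flatten_eq_nil_iff.mp hnil g2 (by simp))
      calc PySem.Chars.join sep ((g :: g2 :: rest2).map (PySem.Chars.join sep))
          = PySem.Chars.join sep g ++ sep ++ PySem.Chars.join sep ((g2 :: rest2).map (PySem.Chars.join sep)) := by
            rw [List.map_cons, List.map_cons, PySem.Chars.join_cons_cons]
        _ = PySem.Chars.join sep g ++ sep ++ PySem.Chars.join sep (g2 :: rest2).flatten := by
            rw [ih hrest]
        _ = PySem.Chars.join sep (g ++ (g2 :: rest2).flatten) := by
            rw [chars_join_append sep g _ hg hflat]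
        _ = PySem.Chars.join sep (g :: g2 :: rest2).flatten := by simp

-- the same at String level
lemma str_join_flatten (sep : String) (groups : List (List String))
    (h : ∀ g ∈ groups, g ≠ []) :
    PySem.Str.join sep (groups.map (PySem.Str.join sep)) = PySem.Str.join sep groups.flatten := by
  apply String.ext
  rw [PySem.Str.toList_join, PySem.Str.toList_join]
  have hmap : (groups.map (PySem.Str.join sep)).map String.toList
      = (groups.map (fun g => g.map String.toList)).map (PySem.Chars.join sep.toList) := by
    simp only [List.map_map]
    apply List.map_congr_left
    intro g _
    exact PySem.Str.toList_join sep g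
  have hflat : groups.flatten.map String.toList = (groups.map (fun g => g.map String.toList)).flatten := by
    simp [List.map_flatten]
  rw [hmap, hflat]
  apply chars_join_flatten
  intro g hg
  rcases List.mem_map.mp hg with ⟨g0, hg0, rfl⟩
  simpa using h g0 hg0

-- ===== VERDICT (by name: the statement is the Claim_ definition above) =====
theorem toc_table_text_py_spec : Claim_equal_toc_table_text_py := by
  intro element _
  unfold Spec_toc_table_text_py toc_table_text_py toc_table_text_py_alt
  set cells := (PySem.Dict.mk element).getD "cells" [] with hcells
  by_cases hnil : cells = []
  · simp [hnil]
  · simp only [hnil, if_false]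
    rw [aFold_eq_pairsFold, bFold_eq_pairsList]
    set ps := pairsList cells with hps
    rw [keys_pairsFold_empty, partsFold_eq_map]
    set ks := PySem.List.sorted (PySem.Set.ofList (ps.map Prod.fst)) (fun k => k) with hks
    simp only [List.nil_append]
    have hgroups : (ks.map fun k =>
        PySem.Str.join " " ((ps.foldl (fun d p => d.modify p.1 [] (· ++ [p.2])) PySem.Dict.empty).getD k []))
        = (ks.map fun k => (ps.filter (fun p => p.1 == k)).map Prod.snd).map (PySem.Str.join " ") := by
      simp only [List.map_map]
      apply List.map_congr_left
      intro k _
      simp [getD_pairsFold, Function.comp]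
    rw [hgroups]
    have hflatmap : ks.flatMap (fun k => (ps.filter (fun p => p.1 == k)).map Prod.snd)
        = (ks.map fun k => (ps.filter (fun p => p.1 == k)).map Prod.snd).flatten := by
      simp [List.flatMap_def]
    rw [hflatmap]
    congr 1
    apply str_join_flatten
    intro g hg
    rcases List.mem_map.mp hg with ⟨k, hk, rfl⟩
    have hkmem : k ∈ ps.map Prod.fst := by
      have h1 : k ∈ PySem.Set.ofList (ps.map Prod.fst) :=
        (PySem.List.mem_sorted _ _ _ k).mp (hks ▸ hk)
      exact (PySem.Set.mem_ofList _ k).mp h1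
    rcases List.mem_map.mp hkmem with ⟨p, hp, rfl⟩
    have hmem : p ∈ ps.filter (fun q => q.1 == p.1) := List.mem_filter.mpr ⟨hp, by simp⟩
    intro hempty
    rw [List.map_eq_nil_iff] at hempty
    rw [hempty] at hmem
    simp at hmem
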